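-- pv_equiv track=rewrite | github.com/sidg1215/DesignPatterns | solution.py | solution
-- ===== SOURCE A (Python) =====
-- def solution(data, n):
--     # Your code here
--     counts = {}
--     for i in data:
--         if i in counts:
--             counts[i] += 1
--         else:
--             counts[i] = 1
--     toReturn = []
--     for i in data:
--         if counts[i] <= n and counts[i] != -1:
--             toReturn.append(i)
--             counts[i] = -1
--     return toReturn
-- ===== SOURCE B (Python) =====
-- def solution(data, n):
--     counts = {}
--     for i in data:
--         counts[i] = counts.get(i, 0) + 1
--     return [k for k, c in counts.items() if c <= n]
-- ===== Notes on version B (the rewrite author's own statement) =====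
-- stated objective: simpler
-- what changed: B drops A's second pass over data and its -1 sentinel deduplication, emitting the answer directly from the count dict's items (insertion order = first-occurrence order).
import Mathlib
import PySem

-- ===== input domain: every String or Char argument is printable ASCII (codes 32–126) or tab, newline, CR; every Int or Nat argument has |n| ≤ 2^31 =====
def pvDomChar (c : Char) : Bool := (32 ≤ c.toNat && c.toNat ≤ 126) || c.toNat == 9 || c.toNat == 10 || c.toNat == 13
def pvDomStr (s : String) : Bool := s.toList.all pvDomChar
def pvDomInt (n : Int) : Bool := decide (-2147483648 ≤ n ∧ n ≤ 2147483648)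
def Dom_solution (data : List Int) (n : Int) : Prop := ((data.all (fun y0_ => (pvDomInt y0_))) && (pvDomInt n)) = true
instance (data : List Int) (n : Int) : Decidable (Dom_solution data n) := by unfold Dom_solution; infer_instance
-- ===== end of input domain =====

-- B drops A's second pass over data and its -1 sentinel deduplication, emitting the answer directly
-- from the count dict's items (first-insertion order = first-occurrence order); simpler, same cost.


-- ===== PORT A =====
-- A's first loop: 'if i in counts: counts[i] += 1 else: counts[i] = 1'
def solutionCountA (data : List Int) : PySem.Dict Int Int :=
  data.foldl (fun counts i =>
    if counts.contains i then counts.insert i (counts.getD i 0 + 1)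
    else counts.insert i 1) PySem.Dict.empty

-- A's second loop; 'counts[i]' is ported as getD _ 0: every i of data is a key of counts, so the lookup never raises
def solutionLoopA (n : Int) : PySem.Dict Int Int → List Int → List Int → List Int
  | _, toReturn, [] => toReturn
  | counts, toReturn, i :: rest =>
    if counts.getD i 0 ≤ n ∧ counts.getD i 0 ≠ -1 then
      solutionLoopA n (counts.insert i (-1)) (toReturn ++ [i]) rest
    else solutionLoopA n counts toReturn rest

def solution (data : List Int) (n : Int) : List Int :=
  solutionLoopA n (solutionCountA data) [] data

-- ===== PORT B =====
def solution_alt (data : List Int) (n : Int) : List Int :=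
  let counts := data.foldl (fun counts i => counts.insert i (counts.getD i 0 + 1)) PySem.Dict.empty
  (counts.items.filter (fun p => p.2 ≤ n)).map (fun p => p.1)

-- ===== PRECONDITION & SPEC =====
def Spec_solution (data : List Int) (n : Int) (out : List Int) : Prop := out = solution_alt data n
instance (data : List Int) (n : Int) (out : List Int) : Decidable (Spec_solution data n out) := by unfold Spec_solution; infer_instance

-- ===== CLAIM (what is proved, stated in full; the proofs are below) =====
def Claim_equal_solution : Prop := ∀ (data : List Int) (n : Int), Dom_solution data n → Spec_solution data n (solution data n)

-- ===== LEMMAS AND PROOFS =====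

-- A's counting loop builds exactly Counter(data)
theorem solutionCountA_eq_counter (data : List Int) :
    solutionCountA data = PySem.Dict.counter data := by
  rw [← PySem.Dict.foldl_insert_getD_add_one_eq_counter]
  unfold solutionCountA
  have hf : (fun (counts : PySem.Dict Int Int) (i : Int) =>
      if counts.contains i then counts.insert i (counts.getD i 0 + 1)
      else counts.insert i 1)
      = (fun (d : PySem.Dict Int Int) (x : Int) => d.insert x (d.getD x 0 + 1)) := by
    funext d i
    by_cases h : d.contains i
    · simp [h]
    · simp only [Bool.not_eq_true] at h
      rw [if_neg (by simp [h]), PySem.Dict.getD_of_not_contains d 0 h, zero_add]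
  rw [hf]

-- a PySem.Set's discard is a filter
theorem discard_eq_filter (s : List Int) (x : Int) :
    PySem.Set.discard s x = s.filter (fun y => y != x) := rfl

-- first-occurrence dedup commutes with filter
theorem ofList_filter (q : Int → Bool) (xs : List Int) :
    PySem.Set.ofList (xs.filter q) = (PySem.Set.ofList xs).filter q := by
  induction xs with
  | nil => simp [PySem.Set.ofList_nil]
  | cons x xs ih =>
    by_cases hq : q x
    · rw [List.filter_cons_of_pos hq, PySem.Set.ofList_cons, PySem.Set.ofList_cons,
        discard_eq_filter, discard_eq_filter, List.filter_cons_of_pos hq, ih,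
        List.filter_filter, List.filter_filter]
      congr 1
      apply List.filter_congr
      intro y _
      rw [Bool.and_comm]
    · rw [List.filter_cons_of_neg hq, PySem.Set.ofList_cons, discard_eq_filter,
        List.filter_cons_of_neg hq, List.filter_filter, ih]
      apply List.filter_congr
      intro y _
      by_cases hyx : y = x
      · subst hyx; simp [hq]
      · simp [hyx]

-- accumulator lemma for A's second loop
theorem solutionLoopA_acc (n : Int) (d : PySem.Dict Int Int) (acc xs : List Int) :
    solutionLoopA n d acc xs = acc ++ solutionLoopA n d [] xs := by
  induction xs generalizing d acc with
  | nil => simp [solutionLoopA]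
  | cons i rest ih =>
    simp only [solutionLoopA]
    split_ifs with h
    · rw [ih _ (acc ++ [i]), ih _ ([] ++ [i])]
      simp
    · exact ih d acc

-- characterisation of A's second loop: first occurrences of the unmarked elements whose count is ≤ n
theorem solutionLoopA_eq (n : Int) (d : PySem.Dict Int Int) (xs : List Int) :
    solutionLoopA n d [] xs =
      (PySem.Set.ofList (xs.filter (fun x => !(d.getD x 0 == -1)))).filter
        (fun x => decide (d.getD x 0 ≤ n)) := by
  induction xs generalizing d with
  | nil => simp [solutionLoopA, PySem.Set.ofList_nil]
  | cons i rest ih =>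
    simp only [solutionLoopA]
    split_ifs with h
    · obtain ⟨hle, hne⟩ := h
      rw [solutionLoopA_acc, ih (d.insert i (-1))]
      have hP : rest.filter (fun y => !((d.insert i (-1)).getD y 0 == -1))
          = (rest.filter (fun y => !(d.getD y 0 == -1))).filter (fun y => y != i) := by
        rw [List.filter_filter]
        apply List.filter_congr
        intro y _
        rw [PySem.Dict.getD_insert]
        by_cases hyi : y = i
        · subst hyi; simp
        · simp [hyi]
      rw [hP, ofList_filter]
      have hQ : ((PySem.Set.ofList (rest.filter (fun y => !(d.getD y 0 == -1)))).filter
            (fun y => y != i)).filter (fun y => decide ((d.insert i (-1)).getD y 0 ≤ n))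
          = ((PySem.Set.ofList (rest.filter (fun y => !(d.getD y 0 == -1)))).filter
            (fun y => y != i)).filter (fun y => decide (d.getD y 0 ≤ n)) := by
        apply List.filter_congr
        intro y hy
        have hyi : y ≠ i := by
          have := List.of_mem_filter hy
          simpa using this
        rw [PySem.Dict.getD_insert, if_neg hyi]
      rw [hQ]
      have hPi : List.filter (fun x => !(d.getD x 0 == -1)) (i :: rest)
          = i :: rest.filter (fun x => !(d.getD x 0 == -1)) := by
        simp [hne]
      rw [hPi, PySem.Set.ofList_cons, discard_eq_filter, List.filter_cons]
      simp [hle]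
    · rw [ih d]
      simp only [not_and, not_not] at h
      by_cases hv : d.getD i 0 = -1
      · have hPi : List.filter (fun x => !(d.getD x 0 == -1)) (i :: rest)
            = rest.filter (fun x => !(d.getD x 0 == -1)) := by
          simp [hv]
        rw [hPi]
      · have hgt : ¬ (d.getD i 0 ≤ n) := fun hle => hv (h hle)
        have hPi : List.filter (fun x => !(d.getD x 0 == -1)) (i :: rest)
            = i :: rest.filter (fun x => !(d.getD x 0 == -1)) := by
          simp [hv]
        rw [hPi, PySem.Set.ofList_cons, discard_eq_filter, List.filter_cons]
        rw [if_neg (by simpa using hgt), List.filter_filter]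
        apply List.filter_congr
        intro y _
        by_cases hyi : y = i
        · subst hyi; simp [hgt]
        · simp [hyi]

-- the two ports agree on every input
theorem solution_eq_alt (data : List Int) (n : Int) : solution data n = solution_alt data n := by
  unfold solution solution_alt
  simp only []
  rw [solutionCountA_eq_counter, solutionLoopA_eq, PySem.Dict.foldl_insert_getD_add_one_eq_counter,
    PySem.Dict.items_counter, List.filter_map, List.map_map]
  have hdata : data.filter (fun x => !((PySem.Dict.counter data).getD x 0 == -1)) = data := by
    apply List.filter_eq_self.mpr
    intro a ha
    rw [PySem.Dict.getD_counter]
    have : 0 < data.count a := List.count_pos_iff.mpr ha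
    simp
  rw [hdata]
  have hmap : (fun (p : Int × Int) => p.1) ∘ (fun k => (k, ((data.count k : Int)))) = id := rfl
  rw [hmap, List.map_id]
  apply List.filter_congr
  intro y _
  rw [PySem.Dict.getD_counter]
  rfl

-- ===== VERDICT (by name: the statement is the Claim_ definition above) =====
theorem solution_spec : Claim_equal_solution := by
  intro data n _
  exact solution_eq_alt data n
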